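-- pv_equiv track=rewrite | github.com/gakiw0/SOP-Generalization | Engine/src/rules_engine/evaluator.py | classify_step
-- ===== SOURCE A (Python) =====
-- from typing import Dict, List, Optional, Tuple
--
-- def classify_step(rule_results: List[Tuple[str, bool]]) -> str:
--     """
--     Rough classification similar to original classify_step: correct if all pass,
--     wrong if all fail, otherwise mid.
--     """
--     if not rule_results:
--         return "mid"
--     if all(passed for _, passed in rule_results):
--         return "correct"
--     if all(not passed for _, passed in rule_results):
--         return "wrong"
--     return "mid"
-- ===== SOURCE B (Python) =====
-- def classify_step(rule_results):
--     if not rule_results: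
--         return "mid"
--     first = rule_results[0][1]
--     for _, p in rule_results[1:]:
--         if p != first:
--             return "mid"
--     return "correct" if first else "wrong"
-- ===== Notes on version B (the rewrite author's own statement) =====
-- stated objective: alternative
-- what changed: Instead of A's two all() scans over pass/fail, B checks homogeneity against the first flag in one early-exit scan of the tail and lets that first flag alone decide correct/wrong.
import Mathlib
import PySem

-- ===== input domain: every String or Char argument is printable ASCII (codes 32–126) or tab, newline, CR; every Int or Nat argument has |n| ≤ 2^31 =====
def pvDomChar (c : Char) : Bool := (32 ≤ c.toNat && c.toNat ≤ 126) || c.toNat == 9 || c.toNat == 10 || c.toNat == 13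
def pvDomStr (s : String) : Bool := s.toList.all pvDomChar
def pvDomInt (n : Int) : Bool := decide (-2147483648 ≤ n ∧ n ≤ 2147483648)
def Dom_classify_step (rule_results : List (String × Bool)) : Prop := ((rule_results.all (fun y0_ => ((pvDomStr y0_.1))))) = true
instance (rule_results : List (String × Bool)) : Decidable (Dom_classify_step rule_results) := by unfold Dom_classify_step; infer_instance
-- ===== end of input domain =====

-- B replaces A's two all() scans with a single early-exit homogeneity scan against the first flag; alternative decomposition, same cost.

-- ===== PORT A =====
def classify_step (rule_results : List (String × Bool)) : String :=
  if rule_results = [] then "mid"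
  else if rule_results.all (fun x => x.2) then "correct"
  else if rule_results.all (fun x => !x.2) then "wrong"
  else "mid"

-- ===== PORT B =====
-- the for-loop over the tail: early return "mid" on a flag differing from `first`
def pvScan (first : Bool) : List (String × Bool) → String
  | [] => if first then "correct" else "wrong"
  | y :: t => if y.2 != first then "mid" else pvScan first t

def classify_step_alt (rule_results : List (String × Bool)) : String :=
  match rule_results with
  | [] => "mid"
  | x :: t => pvScan x.2 t

-- ===== PRECONDITION & SPEC =====
def Spec_classify_step (rule_results : List (String × Bool)) (out : String) : Prop := out = classify_step_alt rule_results
instance (rule_results : List (String × Bool)) (out : String) : Decidable (Spec_classify_step rule_results out) := by unfold Spec_classify_step; infer_instance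

-- ===== CLAIM (what is proved, stated in full; the proofs are below) =====
def Claim_equal_classify_step : Prop := ∀ (rule_results : List (String × Bool)), Dom_classify_step rule_results → Spec_classify_step rule_results (classify_step rule_results)

-- ===== LEMMAS AND PROOFS =====

-- the scan returns the verdict of `first` iff every tail flag equals `first`, else "mid"
theorem pvScan_eq (f : Bool) (t : List (String × Bool)) :
    pvScan f t = if t.all (fun y => y.2 == f) then (if f then "correct" else "wrong") else "mid" := by
  induction t with
  | nil => simp [pvScan]
  | cons y t ih =>
    simp only [pvScan, List.all_cons]
    by_cases h : y.2 = f
    · simp only [h, bne_self_eq_false, Bool.false_eq_true, if_false, beq_self_eq_true, Bool.true_and]; simp [ih]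
    · simp [bne, show (y.2 == f) = false from by cases f <;> cases hy : y.2 <;> simp_all]

-- ===== VERDICT (by name: the statement is the Claim_ definition above) =====
theorem classify_step_spec : Claim_equal_classify_step := by
  intro l _
  unfold Spec_classify_step classify_step classify_step_alt
  cases l with
  | nil => simp
  | cons x t =>
    show _ = pvScan x.2 t
    rw [pvScan_eq]
    cases hx : x.2
    · by_cases h : t.all (fun y => !y.2) <;> simp [hx, h]
    · by_cases h : t.all (fun y => y.2) <;> simp [hx, h]
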